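-- pv_equiv track=rewrite | github.com/CarloRomeo427/ASPEQ | main.py | normalize_env_name
-- ===== SOURCE A (Python) =====
-- MUJOCO_ENVS = {
--     'hopper', 'halfcheetah', 'walker2d', 'ant', 'swimmer', 'humanoid',
--     'invertedpendulum', 'inverteddoublependulum', 'pusher', 'reacher'
-- }
--
-- ANTMAZE_SIZES = {'umaze', 'medium', 'large'}
--
-- ADROIT_ENVS = {'pen', 'door', 'hammer', 'relocate'}
--
-- def normalize_env_name(env_name: str) -> tuple:
--     """
--     Normalize user-provided environment name to canonical form.
--
--     Accepts various formats:
--     - MuJoCo: 'hopper', 'Hopper', 'Hopper-v5', 'hopper-v4' → ('hopper', 'mujoco')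
--     - AntMaze: 'antmaze-large', 'antmaze-medium', 'AntMaze_Large' → ('large', 'antmaze')
--     - Adroit: 'door', 'pen', 'hammer', 'relocate' → ('door', 'adroit')
--
--     Returns:
--         (canonical_name, env_suite) tuple
--     """
--     env_lower = env_name.lower().replace('_', '-')
--
--     # Strip version suffix if present (e.g., -v5, -v4)
--     base = env_lower
--     if '-v' in env_lower:
--         parts = env_lower.rsplit('-v', 1)
--         if parts[1].isdigit():
--             base = parts[0]
--
--     # Check MuJoCo
--     for mujoco_env in MUJOCO_ENVS:
--         if base == mujoco_env or base.startswith(mujoco_env + '-'):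
--             return mujoco_env, 'mujoco'
--
--     # Check AntMaze
--     if 'antmaze' in base:
--         # Extract size: antmaze-large → large
--         for size in ANTMAZE_SIZES:
--             if size in base:
--                 return size, 'antmaze'
--         return 'umaze', 'antmaze'  # default
--
--     # Check Adroit
--     for adroit_env in ADROIT_ENVS:
--         if base == adroit_env or base.startswith(adroit_env + '-'):
--             return adroit_env, 'adroit'
--
--     raise ValueError(f"Unknown environment: {env_name}. "
--                      f"Supported: MuJoCo ({', '.join(sorted(MUJOCO_ENVS))}), "
--                      f"AntMaze (antmaze-umaze/medium/large), "
--                      f"Adroit ({', '.join(sorted(ADROIT_ENVS))})")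
-- ===== SOURCE B (Python) =====
-- MUJOCO_ENVS = {
--     'hopper', 'halfcheetah', 'walker2d', 'ant', 'swimmer', 'humanoid',
--     'invertedpendulum', 'inverteddoublependulum', 'pusher', 'reacher'
-- }
--
-- ANTMAZE_SIZES = ('umaze', 'medium', 'large')
--
-- ADROIT_ENVS = {'pen', 'door', 'hammer', 'relocate'}
--
-- # One combined suite table replaces the two per-suite env scans.
-- _SUITE_OF = {env: 'mujoco' for env in MUJOCO_ENVS}
-- _SUITE_OF.update({env: 'adroit' for env in ADROIT_ENVS})
--
--
-- def _strip_version(base):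
--     """Drop a trailing '-v<digits>' by scanning the digits from the right end."""
--     digits = 0
--     for ch in reversed(base):
--         if not ch.isdigit():
--             break
--         digits += 1
--     i = len(base) - digits
--     if digits and i >= 2 and base[i - 2:i] == '-v':
--         return base[:i - 2]
--     return base
--
--
-- def normalize_env_name(env_name: str) -> tuple:
--     """Normalize via a right-to-left version strip, one head token and one suite table."""
--     base = _strip_version(env_name.lower().replace('_', '-'))
--     head = base.partition('-')[0]
--     suite = _SUITE_OF.get(head)
--     if suite == 'mujoco':
--         return head, suite
--     if 'antmaze' in base:
--         found = [size for size in ANTMAZE_SIZES if size in base]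
--         return (found[0] if found else 'umaze'), 'antmaze'
--     if suite == 'adroit':
--         return head, suite
--     raise ValueError(f"Unknown environment: {env_name}. "
--                      f"Supported: MuJoCo ({', '.join(sorted(MUJOCO_ENVS))}), "
--                      f"AntMaze (antmaze-umaze/medium/large), "
--                      f"Adroit ({', '.join(sorted(ADROIT_ENVS))})")
-- ===== Notes on version B (the rewrite author's own statement) =====
-- stated objective: alternative
-- what changed: B strips the version suffix with a right-to-left digit scan (count trailing digits, then test for '-v' just before them) instead of A's rsplit('-v', 1), and replaces A's two scan-and-startswith loops over the MuJoCo and Adroit sets by one head token (the prefix before the first dash) looked up in a single precomputed token-to-suite table; Pre_ excludes unrecognized names (A raises ValueError) and antmaze names containing two or more size words, where A's answer depends on Python's hash-randomized set iteration order.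
-- outside the precondition, e.g. on normalize_env_name('antmaze-umaze-large'): A returns ('large', 'antmaze'), B returns ('umaze', 'antmaze')
import Mathlib
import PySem

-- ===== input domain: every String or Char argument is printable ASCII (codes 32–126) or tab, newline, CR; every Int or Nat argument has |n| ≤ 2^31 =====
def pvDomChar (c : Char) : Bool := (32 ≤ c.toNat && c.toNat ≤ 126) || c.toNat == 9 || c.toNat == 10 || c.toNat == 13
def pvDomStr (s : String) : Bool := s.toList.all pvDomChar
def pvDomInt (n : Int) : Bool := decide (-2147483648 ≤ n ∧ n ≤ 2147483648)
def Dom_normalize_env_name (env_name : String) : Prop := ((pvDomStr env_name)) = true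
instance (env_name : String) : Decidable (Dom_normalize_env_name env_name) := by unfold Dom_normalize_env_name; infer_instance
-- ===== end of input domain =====

-- B restructures A: the version suffix is stripped by a right-to-left digit scan instead of
-- rsplit('-v', 1), and the two per-suite env scans are replaced by one head token looked up in a
-- single combined suite table (objective: alternative). Equivalence is about return values;
-- inputs where Python A raises ValueError or where its answer depends on Python's set iteration
-- order are excluded by Pre_ (see there).

-- ===== PORT A =====
-- the module constants (Python sets of strings, listed in source order; inside Pre_ at most one
-- element ever matches a given input, so the untracked hash iteration order cannot change the result)
def pvMUJOCO : List String :=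
  ["hopper", "halfcheetah", "walker2d", "ant", "swimmer", "humanoid",
   "invertedpendulum", "inverteddoublependulum", "pusher", "reacher"]
def pvSIZES : List String := ["umaze", "medium", "large"]
def pvADROIT : List String := ["pen", "door", "hammer", "relocate"]

-- A's version strip: base = env_lower; if '-v' in env_lower: parts = env_lower.rsplit('-v', 1);
-- if parts[1].isdigit(): base = parts[0].  rsplit('-v', 1) cuts at the LAST occurrence of '-v',
-- ported exactly via rfind (≥ 0 under the '-v' in el guard).
def pvStripA (el : List Char) : List Char :=
  if PySem.Chars.isIn ['-', 'v'] el then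
    let i := (PySem.Chars.rfind el ['-', 'v']).toNat
    if PySem.Chars.strIsdigit (el.drop (i + 2)) then el.take i else el
  else el

-- A's loop test: 'base == env or base.startswith(env + "-")'
def pvMatches (base : List Char) (e : String) : Bool :=
  base == e.toList || PySem.Chars.startswith base (e.toList ++ ['-'])

def normalize_env_name (env_name : String) : String × String :=
  let base := pvStripA (PySem.Chars.replace (PySem.Chars.lower env_name.toList) ['_'] ['-'])
  -- 'for mujoco_env in MUJOCO_ENVS: if …: return' = the first match of the scan
  match pvMUJOCO.find? (fun e => pvMatches base e) with
  | some e => (e, "mujoco")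
  | none =>
    if PySem.Chars.isIn "antmaze".toList base then
      -- 'for size in ANTMAZE_SIZES: if size in base: return size'
      match pvSIZES.find? (fun z => PySem.Chars.isIn z.toList base) with
      | some z => (z, "antmaze")
      | none => ("umaze", "antmaze")
    else
      match pvADROIT.find? (fun e => pvMatches base e) with
      | some e => (e, "adroit")
      | none => ("", "")  -- Python raises ValueError here; outside Pre_

-- ===== PORT B =====
-- _SUITE_OF = {env: 'mujoco' for env in MUJOCO_ENVS} then .update({env: 'adroit' …}):
-- a dict is an association list (first match wins; the env sets are disjoint)
def pvSUITE : List (String × String) :=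
  pvMUJOCO.map (fun e => (e, "mujoco")) ++ pvADROIT.map (fun e => (e, "adroit"))

-- B's _strip_version: 'for ch in reversed(base): if not ch.isdigit(): break; digits += 1' counts
-- the maximal digit suffix — exactly the takeWhile of the reversed list; then one indexed test.
def pvStripB (el : List Char) : List Char :=
  let digits := (el.reverse.takeWhile PySem.Chars.isdigit).length
  let i := el.length - digits
  if digits ≠ 0 ∧ 2 ≤ i ∧ PySem.List.slice el (some ((i : Int) - 2)) (some (i : Int)) = ['-', 'v']
  then el.take (i - 2) else el

def normalize_env_name_alt (env_name : String) : String × String :=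
  let base := pvStripB (PySem.Chars.replace (PySem.Chars.lower env_name.toList) ['_'] ['-'])
  -- head = base.partition('-')[0]: the prefix before the first '-' (exact for a 1-char separator)
  let head := String.ofList (base.takeWhile (fun c => c != '-'))
  -- suite = _SUITE_OF.get(head): first match in the association list
  let suite := (pvSUITE.find? (fun p => p.1 == head)).map (fun p => p.2)
  if suite = some "mujoco" then (head, "mujoco")
  else if PySem.Chars.isIn "antmaze".toList base then
    -- found = [size for size in ANTMAZE_SIZES if size in base]; found[0] if found else 'umaze'
    ((pvSIZES.filter (fun z => PySem.Chars.isIn z.toList base)).headD "umaze", "antmaze")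
  else if suite = some "adroit" then (head, "adroit")
  else ("", "")  -- Python raises ValueError here; outside Pre_

-- ===== PRECONDITION & SPEC =====
-- Pre_ excludes (a) unrecognized names, on which A raises ValueError, and (b) names whose
-- normalized form reaches the antmaze branch while containing two or more of the three size
-- words, on which A's answer depends on Python's hash-randomized set iteration order, so no single
-- return value specifies it (both programs' values are equally defensible there).
def Pre_normalize_env_name (env_name : String) : Prop :=
  let base := pvStripA (PySem.Chars.replace (PySem.Chars.lower env_name.toList) ['_'] ['-'])
  (pvMUJOCO.any (fun e => pvMatches base e) = true
     ∨ PySem.Chars.isIn "antmaze".toList base = true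
     ∨ pvADROIT.any (fun e => pvMatches base e) = true)
  ∧ ((pvMUJOCO.any (fun e => pvMatches base e) = false
        ∧ PySem.Chars.isIn "antmaze".toList base = true)
      → pvSIZES.countP (fun z => PySem.Chars.isIn z.toList base) ≤ 1)
instance (env_name : String) : Decidable (Pre_normalize_env_name env_name) := by
  unfold Pre_normalize_env_name; infer_instance

def pvWitness_normalize_env_name : String := "Hopper-v5"

def Spec_normalize_env_name (env_name : String) (out : String × String) : Prop := out = normalize_env_name_alt env_name
instance (env_name : String) (out : String × String) : Decidable (Spec_normalize_env_name env_name out) := by unfold Spec_normalize_env_name; infer_instance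

-- ===== CLAIM (what is proved, stated in full; the proofs are below) =====
def Claim_equal_normalize_env_name : Prop := ∀ (env_name : String), Dom_normalize_env_name env_name → Pre_normalize_env_name env_name → Spec_normalize_env_name env_name (normalize_env_name env_name)

-- ===== LEMMAS AND PROOFS =====

theorem pv_go_rfind (s sub : List Char) : ∀ (k j : Nat), j ≤ k →
    sub.isPrefixOf (s.drop j) = true →
    (∀ m, j < m → m ≤ k → sub.isPrefixOf (s.drop m) = false) →
    PySem.Chars.rfind.go s sub k = (j : Int) := by
  intro k
  induction k with
  | zero =>
    intro j hj hp _
    interval_cases j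
    simpa [PySem.Chars.rfind.go] using hp
  | succ k ih =>
    intro j hj hp hmax
    by_cases hjk : j = k + 1
    · subst hjk
      simp [PySem.Chars.rfind.go, hp]
    · have hfalse : sub.isPrefixOf (s.drop (k + 1)) = false :=
        hmax (k + 1) (by omega) (by omega)
      simp only [PySem.Chars.rfind.go, hfalse]
      simp only [Bool.false_eq_true, if_false]
      exact ih j (by omega) hp (fun m h1 h2 => hmax m h1 (by omega))

theorem pv_rfind_max (s sub : List Char) (hne : sub ≠ [])
    (h : PySem.Chars.isIn sub s = true) :
    ∃ j : Nat, j ≤ s.length ∧ PySem.Chars.rfind s sub = (j : Int) ∧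
      sub.isPrefixOf (s.drop j) = true ∧
      ∀ m, j < m → sub.isPrefixOf (s.drop m) = false := by
  obtain ⟨j0, hj0⟩ := (PySem.Chars.exists_prefix_drop_iff_isIn sub s).mpr h
  have hj0p : sub.isPrefixOf (s.drop j0) = true := List.isPrefixOf_iff_prefix.mpr hj0
  have hj0len : j0 ≤ s.length := by
    by_contra hlt
    rw [List.drop_eq_nil_of_le (by omega)] at hj0
    exact hne (List.prefix_nil.mp hj0)
  set P : ℕ → Prop := fun m => sub.isPrefixOf (s.drop m) = true with hP
  have hdec : DecidablePred P := fun m => by rw [hP]; infer_instance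
  set j := Nat.findGreatest P s.length with hj
  have hPj : P j := Nat.findGreatest_spec (P := P) hj0len hj0p
  have hjle : j ≤ s.length := Nat.findGreatest_le _
  refine ⟨j, hjle, ?_, hPj, ?_⟩
  · show PySem.Chars.rfind.go s sub s.length = (j : Int)
    apply pv_go_rfind s sub s.length j hjle hPj
    intro m h1 h2
    by_contra hc
    simp only [Bool.not_eq_false] at hc
    exact Nat.findGreatest_is_greatest h1 h2 hc
  · intro m hm
    by_contra hc
    simp only [Bool.not_eq_false] at hc
    have hmlen : m ≤ s.length := by
      by_contra hlt
      rw [List.drop_eq_nil_of_le (by omega)] at hc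
      exact hne (List.prefix_nil.mp (List.isPrefixOf_iff_prefix.mp hc))
    exact Nat.findGreatest_is_greatest hm hmlen hc

theorem pv_takeWhile_digits (d rest : List Char)
    (hd : ∀ c ∈ d, PySem.Chars.isdigit c = true) :
    (d ++ 'v' :: rest).takeWhile PySem.Chars.isdigit = d := by
  rw [List.takeWhile_append, if_pos (by rw [List.takeWhile_eq_self_iff.mpr hd])]
  have : PySem.Chars.isdigit 'v' = false := by decide
  simp [this]


theorem pv_strip_eq (el : List Char) : pvStripB el = pvStripA el := by
  set tw := el.reverse.takeWhile PySem.Chars.isdigit with htw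
  have htwd : ∀ c ∈ tw, PySem.Chars.isdigit c = true := fun c hc =>
    List.mem_takeWhile_imp hc
  set k := tw.length with hk
  set i := el.length - k with hi
  -- the decomposition el = (dropWhile …).reverse ++ tw.reverse
  have hsplit : el = (el.reverse.dropWhile PySem.Chars.isdigit).reverse ++ tw.reverse := by
    conv_lhs => rw [← List.reverse_reverse el,
      ← List.takeWhile_append_dropWhile (p := PySem.Chars.isdigit) (l := el.reverse)]
    rw [List.reverse_append]
  have hlens : el.length = (el.reverse.dropWhile PySem.Chars.isdigit).reverse.length + k := by
    conv_lhs => rw [hsplit]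
    simp [hk]
  have htwlen : k ≤ el.length := by omega
  have hdroplen : (el.reverse.dropWhile PySem.Chars.isdigit).reverse.length = i := by omega
  have hdropi : el.drop i = tw.reverse := by
    conv_lhs => rw [hsplit]
    rw [← hdroplen, List.drop_left]
  by_cases hB : k ≠ 0 ∧ 2 ≤ i ∧
      PySem.List.slice el (some ((i : Int) - 2)) (some (i : Int)) = ['-', 'v']
  · obtain ⟨hd0, hi2, hsl⟩ := hB
    -- the slice is (el.drop (i-2)).take 2
    have hsl' : (el.drop (i - 2)).take 2 = ['-', 'v'] := by
      have hcast : ((i : Int) - 2) = ((i - 2 : Nat) : Int) := by omega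
      rw [hcast] at hsl
      rw [PySem.List.slice_natCast] at hsl
      have : i - (i - 2) = 2 := by omega
      rwa [this] at hsl
    have hdecomp : el.drop (i - 2) = '-' :: 'v' :: el.drop i := by
      have h0 := List.take_append_drop 2 (el.drop (i - 2))
      rw [hsl', List.drop_drop] at h0
      have h1 : i - 2 + 2 = i := by omega
      rw [h1] at h0
      exact h0.symm
    have hilen : i < el.length := by
      have hne : el.drop i ≠ [] := by
        rw [hdropi]
        simp only [ne_eq, List.reverse_eq_nil_iff]
        exact fun h => hd0 (by rw [hk, h]; rfl)
      by_contra hc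
      exact hne (List.drop_eq_nil_of_le (by omega))
    -- A's branch fires at index i-2
    have hpref : List.isPrefixOf ['-', 'v'] (el.drop (i - 2)) = true := by
      rw [hdecomp]; rfl
    have hisin : PySem.Chars.isIn ['-', 'v'] el = true := by
      rw [PySem.Chars.isIn_iff_infix]
      exact ⟨el.take (i - 2), el.drop i, by
        conv_rhs => rw [← List.take_append_drop (i - 2) el, hdecomp]
        simp⟩
    have hmax : ∀ m, i - 2 < m → m ≤ el.length →
        List.isPrefixOf ['-', 'v'] (el.drop m) = false := by
      intro m h1 h2
      by_contra hc
      simp only [Bool.not_eq_false] at hc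
      obtain ⟨t, ht⟩ := List.isPrefixOf_iff_prefix.mp hc
      have hmem : ('-' : Char) ∈ el.drop m := by
        rw [← ht]; simp
      by_cases hm : m = i - 1
      · have hdm : el.drop m = 'v' :: el.drop i := by
          have h3 : el.drop m = (el.drop (i - 2)).drop 1 := by
            rw [List.drop_drop]
            congr 1
            omega
          rw [h3, hdecomp]
          rfl
        rw [hdm] at ht
        simp [List.cons_append] at ht
      · have hmi : i ≤ m := by omega
        have hdd : el.drop m = (el.drop i).drop (m - i) := by
          rw [List.drop_drop]
          congr 1
          omega
        rw [hdd, hdropi] at hmem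
        have := htwd '-' (by
          have := List.mem_of_mem_drop hmem
          rwa [List.mem_reverse] at this)
        exact absurd this (by decide)
    have hrfind : PySem.Chars.rfind el ['-', 'v'] = ((i - 2 : Nat) : Int) := by
      show PySem.Chars.rfind.go el ['-', 'v'] el.length = _
      exact pv_go_rfind el ['-', 'v'] el.length (i - 2) (by omega) hpref hmax
    have hdig : PySem.Chars.strIsdigit (el.drop ((i - 2) + 2)) = true := by
      have h1 : (i - 2) + 2 = i := by omega
      rw [h1, hdropi]
      have hne : tw.reverse ≠ [] := by
        simp only [ne_eq, List.reverse_eq_nil_iff]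
        exact fun h => hd0 (by rw [hk, h]; rfl)
      simp only [PySem.Chars.strIsdigit, Bool.and_eq_true, Bool.not_eq_true',
        List.isEmpty_eq_false_iff, List.all_eq_true]
      exact ⟨by simpa using hne, fun c hc => htwd c (List.mem_reverse.mp hc)⟩
    rw [pvStripB, pvStripA]
    simp only [← htw, ← hk, ← hi]
    rw [if_pos ⟨hd0, hi2, hsl⟩, if_pos hisin]
    simp only [hrfind, Int.toNat_natCast, hdig, if_pos]
  · -- B does not strip; show A does not strip either
    rw [pvStripB]
    simp only [← htw, ← hk, ← hi]
    rw [if_neg hB, pvStripA]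
    by_cases hisin : PySem.Chars.isIn ['-', 'v'] el = true
    · rw [if_pos hisin]
      obtain ⟨j, hjlen, hrf, hpref, hmaxall⟩ := pv_rfind_max el ['-', 'v'] (by simp) hisin
      rw [hrf]
      simp only [Int.toNat_natCast]
      by_cases hdig : PySem.Chars.strIsdigit (el.drop (j + 2)) = true
      · exfalso
        obtain ⟨t, ht⟩ := List.isPrefixOf_iff_prefix.mp hpref
        have htj : el.drop j = '-' :: 'v' :: el.drop (j + 2) := by
          have h2 : (el.drop j).drop 2 = el.drop (j + 2) := by
            rw [List.drop_drop]
          rw [← ht] at h2 ⊢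
          have h2' : t = el.drop (j + 2) := by simpa using h2
          rw [h2']
          rfl
        simp only [PySem.Chars.strIsdigit, Bool.and_eq_true, Bool.not_eq_true',
          List.isEmpty_eq_false_iff, List.all_eq_true] at hdig
        obtain ⟨hdne, hdall⟩ := hdig
        have hrev : el.reverse = (el.drop (j + 2)).reverse ++ 'v' :: '-' :: (el.take j).reverse := by
          conv_lhs => rw [← List.take_append_drop j el, htj]
          simp
        have htw2 : tw = (el.drop (j + 2)).reverse := by
          rw [htw, hrev, pv_takeWhile_digits]
          intro c hc
          exact hdall c (List.mem_reverse.mp hc)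
        have hklen : k = (el.drop (j + 2)).length := by
          rw [hk, htw2, List.length_reverse]
        have hlendrop : (el.drop j).length = 2 + (el.drop (j + 2)).length := by
          rw [htj]
          simp
          omega
        have hj2 : j + 2 ≤ el.length := by
          rw [List.length_drop, List.length_drop] at hlendrop
          omega
        have hieq : i = j + 2 := by
          rw [hi, hklen, List.length_drop]
          omega
        apply hB
        refine ⟨?_, by omega, ?_⟩
        · rw [hklen]
          simp only [ne_eq, List.length_eq_zero_iff]
          exact fun h => (by simp [h] at hdne)
        · have hj' : i - j = 2 := by omega
          have hcast : ((i : Int) - 2) = ((j : Nat) : Int) := by omega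
          rw [hcast, PySem.List.slice_natCast, hj', htj]
          rfl
      · rw [if_neg hdig]
    · rw [if_neg hisin]

theorem pv_find_eq_self (l : List String) (t : String) :
    l.find? (fun e => e == t) = if t ∈ l then some t else none := by
  induction l with
  | nil => simp
  | cons e rest ih =>
    by_cases he : e = t
    · subst he; simp
    · rw [List.find?_cons_of_neg (by simpa using he)]
      simp [ih, Ne.symm he]

theorem pv_suite_eq (t : String) :
    ((pvSUITE.find? (fun p => p.1 == t)).map (fun p => p.2)) =
      (if t ∈ pvMUJOCO then some "mujoco" else if t ∈ pvADROIT then some "adroit" else none) := by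
  unfold pvSUITE
  rw [List.find?_append]
  rw [List.find?_map, List.find?_map]
  simp only [Function.comp_def]
  rw [pv_find_eq_self, pv_find_eq_self]
  by_cases h1 : t ∈ pvMUJOCO <;> by_cases h2 : t ∈ pvADROIT <;> simp [h1, h2]

-- A's per-env test holds iff the env IS the first dash-token (env names contain no dash)
theorem pv_matches_iff (cs : List Char) (e : String) (h : ('-' : Char) ∉ e.toList) :
    pvMatches cs e = true ↔ cs.takeWhile (fun c => c != '-') = e.toList := by
  unfold pvMatches
  rw [Bool.or_eq_true, beq_iff_eq, PySem.Chars.startswith_iff]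
  have hall : ∀ a ∈ e.toList, (a != '-') = true := by
    intro a ha; rw [bne_iff_ne]; rintro rfl; exact h ha
  constructor
  · rintro (rfl | ⟨t, rfl⟩)
    · exact List.takeWhile_eq_self_iff.mpr hall
    · rw [List.append_assoc, List.takeWhile_append,
        if_pos (by rw [List.takeWhile_eq_self_iff.mpr hall])]
      simp
  · intro ht
    have hsplit : cs = e.toList ++ cs.dropWhile (fun c => c != '-') := by
      conv_lhs => rw [← List.takeWhile_append_dropWhile (p := fun c => c != '-') (l := cs)]
      rw [ht]
    match hd : cs.dropWhile (fun c => c != '-') with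
    | [] => left; rw [hsplit, hd, List.append_nil]
    | c :: t =>
      have hc : (c != '-') = false := by
        have := List.head?_dropWhile_not (fun c => c != '-') cs
        rw [hd] at this; exact this
      right
      refine ⟨t, ?_⟩
      rw [hsplit, hd]
      simp only [bne_eq_false_iff_eq] at hc
      rw [hc]
      simp

-- A's scan of a dash-free env list is a lookup of the first dash-token
theorem pv_find?_eq (envs : List String) (cs : List Char) (h : ∀ e ∈ envs, ('-' : Char) ∉ e.toList) :
    envs.find? (fun e => pvMatches cs e) =
      (if envs.contains (String.ofList (cs.takeWhile (fun c => c != '-')))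
       then some (String.ofList (cs.takeWhile (fun c => c != '-'))) else none) := by
  induction envs with
  | nil => simp
  | cons e rest ih =>
    have he : ('-' : Char) ∉ e.toList := h e (by simp)
    have hiff := pv_matches_iff cs e he
    by_cases hm : pvMatches cs e = true
    · have ht : cs.takeWhile (fun c => c != '-') = e.toList := hiff.mp hm
      rw [List.find?_cons_of_pos hm]
      rw [ht, String.ofList_toList]
      simp
    · have ht : ¬ cs.takeWhile (fun c => c != '-') = e.toList := fun hh => hm (hiff.mpr hh)
      rw [List.find?_cons_of_neg (by simpa using hm)]
      rw [ih (fun x hx => h x (by simp [hx]))]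
      have hne : (String.ofList (cs.takeWhile (fun c => c != '-')) == e) = false := by
        rw [beq_eq_false_iff_ne]
        intro hh
        exact ht (by rw [← hh, String.toList_ofList])
      simp [beq_eq_false_iff_ne.mp hne]


-- found[0]-with-default over the filtered sizes IS the first match of A's scan
theorem pv_size_eq (p : String → Bool) :
    (pvSIZES.filter p).headD "umaze" = (pvSIZES.find? p).getD "umaze" := by
  rw [List.headD_eq_head?_getD, List.head?_filter]

-- the two ports agree on every input (the ambiguity Pre_ excludes is a fact about Python's
-- set iteration order, not about these deterministic ports)
theorem pv_ports_agree (env_name : String) :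
    normalize_env_name env_name = normalize_env_name_alt env_name := by
  unfold normalize_env_name normalize_env_name_alt
  dsimp only
  rw [pv_strip_eq]
  set base := pvStripA (PySem.Chars.replace (PySem.Chars.lower env_name.toList) ['_'] ['-'])
    with hbase
  rw [pv_find?_eq pvMUJOCO _ (by decide), pv_find?_eq pvADROIT _ (by decide), pv_suite_eq]
  set tok := String.ofList (base.takeWhile (fun c => c != '-')) with htok
  by_cases h1 : tok ∈ pvMUJOCO
  · simp [h1]
  · rw [if_neg ((List.contains_iff_mem).not.mpr h1)] at *
    by_cases h3 : tok ∈ pvADROIT <;>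
      by_cases h2 : PySem.Chars.isIn "antmaze".toList base = true <;>
        simp only [h1, h3, if_pos, if_false, h2, List.contains_iff_mem] <;>
      simp only [pv_size_eq] <;>
      cases hf : pvSIZES.find? (fun z => PySem.Chars.isIn z.toList base) <;> simp

-- ===== VERDICT (by name: the statement is the Claim_ definition above) =====
theorem normalize_env_name_spec : Claim_equal_normalize_env_name := by
  intro env_name _ _
  unfold Spec_normalize_env_name
  exact pv_ports_agree env_name
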